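-- pv_equiv track=rewrite | github.com/ikvibhav/AlgorithmsToolbox | week3/maxseqpairprod.py | greedy_max_pair_prod
-- ===== SOURCE A (Python) =====
-- def greedy_max_pair_prod(G_n, G_ArrayOne, G_ArrayTwo):
--     if G_n == 0:
--         return 0
--     else:
--         #import pdb; pdb.set_trace()
--         a = max(G_ArrayOne)
--         b = max(G_ArrayTwo)
--         G_ArrayOne.remove(a)
--         G_ArrayTwo.remove(b)
--         G_n -= 1
--         return a*b + greedy_max_pair_prod(G_n,G_ArrayOne, G_ArrayTwo)
-- ===== SOURCE B (Python) =====
-- def greedy_max_pair_prod(G_n, G_ArrayOne, G_ArrayTwo):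
--     xs = sorted(G_ArrayOne, reverse=True)
--     ys = sorted(G_ArrayTwo, reverse=True)
--     return sum(xs[i] * ys[i] for i in range(G_n))
-- ===== Notes on version B (the rewrite author's own statement) =====
-- stated objective: faster
-- what changed: Replaces the recursive repeated max()+remove() passes (quadratic) by sorting both arrays descending once and summing the first n pairwise products; B also does not mutate its list arguments.
import Mathlib
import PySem

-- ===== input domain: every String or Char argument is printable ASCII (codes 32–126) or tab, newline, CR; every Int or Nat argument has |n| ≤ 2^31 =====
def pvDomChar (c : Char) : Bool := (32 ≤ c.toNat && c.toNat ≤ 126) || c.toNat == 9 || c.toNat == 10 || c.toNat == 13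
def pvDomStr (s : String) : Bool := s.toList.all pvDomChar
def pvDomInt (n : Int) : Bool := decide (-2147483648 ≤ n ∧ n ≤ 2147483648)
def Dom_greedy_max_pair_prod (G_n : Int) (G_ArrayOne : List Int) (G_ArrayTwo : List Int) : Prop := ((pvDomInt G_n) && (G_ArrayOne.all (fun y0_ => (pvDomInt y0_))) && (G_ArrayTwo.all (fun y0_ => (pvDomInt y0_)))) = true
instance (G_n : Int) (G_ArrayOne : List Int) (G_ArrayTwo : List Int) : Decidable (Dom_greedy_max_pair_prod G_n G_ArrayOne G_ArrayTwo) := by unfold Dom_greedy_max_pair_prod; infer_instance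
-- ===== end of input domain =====

-- B replaces A's recursive max()+remove() passes by sort-descending-once and sum the first
-- n pairwise products (measured asymptotically faster); A mutates its list arguments in
-- place, B does not — the equivalence proved here is about the RETURN value only.

-- termination helper for port A (cited by its decreasing_by)
theorem pv_remove?_length_lt {xs ys : List Int} {v : Int}
    (h : PySem.List.remove? xs v = some ys) : ys.length < xs.length := by
  have hv : v ∈ xs := by
    by_contra hv
    rw [(PySem.List.remove?_eq_none_iff xs v).mpr hv] at h
    simp at h
  rw [PySem.List.remove?_eq_some_erase xs v hv] at h
  cases h
  have h1 := List.length_erase_of_mem hv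
  have h2 := List.length_pos_of_mem hv
  omega

-- ===== PORT A =====
def greedy_max_pair_prod (G_n : Int) (G_ArrayOne : List Int) (G_ArrayTwo : List Int) : Int :=
  if G_n = 0 then 0
  else
    match PySem.List.max? G_ArrayOne (fun x => x), PySem.List.max? G_ArrayTwo (fun x => x) with
    | some a, some b =>
        match h3 : PySem.List.remove? G_ArrayOne a, PySem.List.remove? G_ArrayTwo b with
      | some a1', some a2' => a * b + greedy_max_pair_prod (G_n - 1) a1' a2'
      | _, _ => 0          -- unreachable under Pre_ (Python raises outside it)
    | _, _ => 0            -- max([]) raises ValueError: outside Pre_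
termination_by G_ArrayOne.length
decreasing_by exact pv_remove?_length_lt h3

-- ===== PORT B =====
def greedy_max_pair_prod_alt (G_n : Int) (G_ArrayOne : List Int) (G_ArrayTwo : List Int) : Int :=
  let xs := PySem.List.sorted G_ArrayOne (fun x => x) true
  let ys := PySem.List.sorted G_ArrayTwo (fun x => x) true
  -- xs[i] / ys[i] are in range under Pre_; pyGetD is exact there
  ((PySem.List.pyRange 0 G_n).map
    (fun i => PySem.List.pyGetD xs i 0 * PySem.List.pyGetD ys i 0)).sum

-- ===== PRECONDITION & SPEC =====
-- Pre_ excludes exactly the inputs where Python A raises: a negative G_n never reaches the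
-- base case, and G_n larger than either array's length empties it, so max() hits an empty list.
def Pre_greedy_max_pair_prod (G_n : Int) (G_ArrayOne : List Int) (G_ArrayTwo : List Int) : Prop :=
  0 ≤ G_n ∧ G_n ≤ G_ArrayOne.length ∧ G_n ≤ G_ArrayTwo.length
instance (G_n : Int) (G_ArrayOne : List Int) (G_ArrayTwo : List Int) : Decidable (Pre_greedy_max_pair_prod G_n G_ArrayOne G_ArrayTwo) := by unfold Pre_greedy_max_pair_prod; infer_instance

def pvWitness_greedy_max_pair_prod : Int × List Int × List Int := (2, [1, 5, 3], [4, 2])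

def Spec_greedy_max_pair_prod (G_n : Int) (G_ArrayOne : List Int) (G_ArrayTwo : List Int) (out : Int) : Prop := out = greedy_max_pair_prod_alt G_n G_ArrayOne G_ArrayTwo
instance (G_n : Int) (G_ArrayOne : List Int) (G_ArrayTwo : List Int) (out : Int) : Decidable (Spec_greedy_max_pair_prod G_n G_ArrayOne G_ArrayTwo out) := by unfold Spec_greedy_max_pair_prod; infer_instance

-- ===== CLAIM (what is proved, stated in full; the proofs are below) =====
def Claim_equal_greedy_max_pair_prod : Prop := ∀ (G_n : Int) (G_ArrayOne : List Int) (G_ArrayTwo : List Int), Dom_greedy_max_pair_prod G_n G_ArrayOne G_ArrayTwo → Pre_greedy_max_pair_prod G_n G_ArrayOne G_ArrayTwo → Spec_greedy_max_pair_prod G_n G_ArrayOne G_ArrayTwo (greedy_max_pair_prod G_n G_ArrayOne G_ArrayTwo)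

-- ===== LEMMAS AND PROOFS =====

-- sorted-descending (key = id) depends only on the multiset of elements
theorem pv_sortedRev_congr {xs ys : List Int} (h : xs.Perm ys) :
    PySem.List.sorted xs (fun x => x) true = PySem.List.sorted ys (fun x => x) true := by
  refine List.Perm.eq_of_pairwise (le := fun a b => b ≤ a)
    (fun a b _ _ h1 h2 => le_antisymm h2 h1) ?_ ?_ ?_
  · exact PySem.List.sorted_pairwise_rev xs (fun x => x)
  · exact PySem.List.sorted_pairwise_rev ys (fun x => x)
  · exact (PySem.List.sorted_perm xs (fun x => x) true).trans
      (h.trans (PySem.List.sorted_perm ys (fun x => x) true).symm)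

-- removing a maximal element corresponds to dropping the head of the descending sort
theorem pv_sortedRev_erase_head {xs : List Int} {a : Int} {t : List Int}
    (hs : PySem.List.sorted xs (fun x => x) true = a :: t) :
    PySem.List.sorted (xs.erase a) (fun x => x) true = t := by
  have hperm : (xs.erase a).Perm ((a :: t).erase a) :=
    ((PySem.List.sorted_perm xs (fun x => x) true).symm.trans
      (by rw [hs])).erase a
  have ht : ((a :: t).erase a) = t := by simp
  rw [pv_sortedRev_congr (ht ▸ hperm)]
  have hp : (a :: t).Pairwise (fun p q => q ≤ p) := by
    rw [← hs]; exact PySem.List.sorted_pairwise_rev xs (fun x => x)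
  exact PySem.List.sorted_rev_eq_self_of_pairwise t (fun x => x) (List.Pairwise.of_cons hp)

-- the head of the descending sort is the value max() returns
theorem pv_max_eq_head {xs : List Int} {a : Int} {m : Int} {t : List Int}
    (hm : PySem.List.max? xs (fun x => x) = some m)
    (hs : PySem.List.sorted xs (fun x => x) true = a :: t) : m = a := by
  have ha : a ∈ xs := by
    have : a ∈ PySem.List.sorted xs (fun x => x) true := by rw [hs]; exact List.mem_cons_self
    exact (PySem.List.mem_sorted xs (fun x => x) true a).1 this
  have hmx := PySem.List.max?_isMax hm
  have hmem := PySem.List.max?_mem hm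
  have h1 : a ≤ m := hmx a ha
  have h2 : m ≤ a := PySem.List.key_head_sorted_rev_ge xs (fun x => x) hs m hmem
  exact le_antisymm h2 h1

-- main loop invariant: A on n = k equals the sum of the first k pairwise products of the
-- descending sorts
theorem pv_main (k : Nat) : ∀ (a1 a2 : List Int), k ≤ a1.length → k ≤ a2.length →
    greedy_max_pair_prod (k : Int) a1 a2 =
      ((List.range k).map (fun i =>
        (PySem.List.sorted a1 (fun x => x) true).getD i 0 *
        (PySem.List.sorted a2 (fun x => x) true).getD i 0)).sum := by
  induction k with
  | zero => intro a1 a2 _ _; simp [greedy_max_pair_prod]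
  | succ k ih =>
    intro a1 a2 h1 h2
    have hne1 : a1 ≠ [] := by intro h; subst h; simp at h1
    have hne2 : a2 ≠ [] := by intro h; subst h; simp at h2
    obtain ⟨a, ha⟩ : ∃ a, PySem.List.max? a1 (fun x => x) = some a := by
      cases hm : PySem.List.max? a1 (fun x => x) with
      | none => exact absurd ((PySem.List.max?_eq_none_iff a1 _).1 hm) hne1
      | some a => exact ⟨a, rfl⟩
    obtain ⟨b, hb⟩ : ∃ b, PySem.List.max? a2 (fun x => x) = some b := by
      cases hm : PySem.List.max? a2 (fun x => x) with
      | none => exact absurd ((PySem.List.max?_eq_none_iff a2 _).1 hm) hne2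
      | some b => exact ⟨b, rfl⟩
    have hr1 : PySem.List.remove? a1 a = some (a1.erase a) :=
      PySem.List.remove?_eq_some_erase a1 a (PySem.List.max?_mem ha)
    have hr2 : PySem.List.remove? a2 b = some (a2.erase b) :=
      PySem.List.remove?_eq_some_erase a2 b (PySem.List.max?_mem hb)
    obtain ⟨a', t1, hs1⟩ : ∃ a' t1, PySem.List.sorted a1 (fun x => x) true = a' :: t1 := by
      cases hs : PySem.List.sorted a1 (fun x => x) true with
      | nil => exact absurd ((PySem.List.sorted_eq_nil_iff a1 _ true).1 hs) hne1
      | cons a' t1 => exact ⟨a', t1, rfl⟩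
    obtain ⟨b', t2, hs2⟩ : ∃ b' t2, PySem.List.sorted a2 (fun x => x) true = b' :: t2 := by
      cases hs : PySem.List.sorted a2 (fun x => x) true with
      | nil => exact absurd ((PySem.List.sorted_eq_nil_iff a2 _ true).1 hs) hne2
      | cons b' t2 => exact ⟨b', t2, rfl⟩
    have hae : a = a' := pv_max_eq_head ha hs1
    have hbe : b = b' := pv_max_eq_head hb hs2
    have hcast : ((k + 1 : Nat) : Int) - 1 = (k : Int) := by push_cast; ring
    have hlen1 : k ≤ (a1.erase a).length := by
      have := List.length_erase_of_mem (PySem.List.max?_mem ha); omega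
    have hlen2 : k ≤ (a2.erase b).length := by
      have := List.length_erase_of_mem (PySem.List.max?_mem hb); omega
    rw [greedy_max_pair_prod]
    rw [if_neg (by exact_mod_cast Nat.succ_ne_zero k)]
    simp only [ha, hb, hr2]
    split
    · rename_i a1' a2' heq1 heq2
      rw [hr1] at heq1
      injection heq1 with heq1
      injection heq2 with heq2
      subst heq1 heq2
      rw [hcast, ih _ _ hlen1 hlen2]
      subst hae hbe
      rw [pv_sortedRev_erase_head hs1, pv_sortedRev_erase_head hs2, hs1, hs2]
      rw [List.range_succ_eq_map, List.map_cons, List.map_map, List.sum_cons]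
      simp [Function.comp_def]
    · rename_i hcontra
      exact (hcontra (a1.erase a) (a2.erase b) hr1 rfl).elim

-- ===== VERDICT (by name: the statement is the Claim_ definition above) =====
theorem greedy_max_pair_prod_spec : Claim_equal_greedy_max_pair_prod := by
  intro n a1 a2 _ hpre
  obtain ⟨h0, hl1, hl2⟩ := hpre
  unfold Spec_greedy_max_pair_prod greedy_max_pair_prod_alt
  have hk : n = ((n.toNat : Nat) : Int) := by omega
  have hmap : ∀ (s1 s2 : List Int),
      ((fun i => PySem.List.pyGetD s1 i 0 * PySem.List.pyGetD s2 i 0) ∘ fun k : Nat => (k : Int)) =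
        fun i : Nat => s1.getD i 0 * s2.getD i 0 := by
    intro s1 s2
    funext i
    simp [Function.comp, PySem.List.pyGetD_natCast]
  rw [hk]
  simp only [PySem.List.pyRange_zero_natCast, List.map_map, hmap]
  exact pv_main n.toNat a1 a2 (by omega) (by omega)
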